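-- pv_equiv track=rewrite | github.com/NavodPeiris/MazeWalker | image_to_maze/code_for_alog_app.py | group_coordinates
-- ===== SOURCE A (Python) =====
-- def group_coordinates(coords, threshold=None):
--     if not coords:
--         return []
--
--     coords = sorted(coords)
--     groups = [[coords[0]]]
--
--     for coord in coords[1:]:
--         if coord - groups[-1][-1] <= threshold:
--             groups[-1].append(coord)
--         else:
--             groups.append([coord])
--
--     return [sum(group) // len(group) for group in groups]
-- ===== SOURCE B (Python) =====
-- def group_coordinates(coords, threshold=None):
--     s = sorted(coords)
--     out = []
--     while s:
--         # peel the leading group: longest prefix with consecutive gaps <= threshold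
--         k = 1
--         while k < len(s) and s[k] - s[k - 1] <= threshold:
--             k += 1
--         out.append(sum(s[:k]) // k)
--         s = s[k:]
--     return out
-- ===== Notes on version B (the rewrite author's own statement) =====
-- stated objective: alternative
-- what changed: B replaces A's fused fold that grows a list-of-lists (append to the last group or start a new one, then average all groups at the end) by a peel-off decomposition: repeatedly split the longest leading run with consecutive gaps <= threshold off the sorted list and emit its floor-average immediately.
-- outside the precondition, e.g. on group_coordinates([1, 2], None): A raises TypeError, B raises TypeError
import Mathlib
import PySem

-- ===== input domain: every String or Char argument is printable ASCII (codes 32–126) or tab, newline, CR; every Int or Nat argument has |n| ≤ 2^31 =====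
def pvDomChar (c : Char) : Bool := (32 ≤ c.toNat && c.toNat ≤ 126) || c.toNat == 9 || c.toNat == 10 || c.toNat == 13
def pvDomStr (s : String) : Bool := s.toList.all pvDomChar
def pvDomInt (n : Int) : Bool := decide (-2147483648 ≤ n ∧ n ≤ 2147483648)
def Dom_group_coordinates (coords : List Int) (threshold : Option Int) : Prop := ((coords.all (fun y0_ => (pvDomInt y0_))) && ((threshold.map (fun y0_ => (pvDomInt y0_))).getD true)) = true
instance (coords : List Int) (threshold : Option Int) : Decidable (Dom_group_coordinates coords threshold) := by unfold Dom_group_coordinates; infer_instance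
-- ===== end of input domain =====

-- B peels the leading gap-run off the sorted list and averages it at once, instead of A's
-- fused fold over a growing list of groups; same cost ("alternative"), return value proved equal on Pre_.

-- `x <= threshold` for an Optional[int] threshold; Python raises TypeError on None,
-- which Pre_group_coordinates excludes (the `none` branch is never reached under Pre_).
def pvLeOpt (a : Int) (t : Option Int) : Bool :=
  match t with
  | some v => decide (a ≤ v)
  | none => false

-- ===== PORT A =====
def group_coordinates (coords : List Int) (threshold : Option Int) : List Int :=
  match coords with
  | [] => []
  | _ =>
    match PySem.List.sorted coords (fun x => x) with
    | [] => []
    | c0 :: rest =>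
      let st := rest.foldl
        (fun (st : List (List Int) × List Int) coord =>
          if pvLeOpt (coord - st.2.getLast!) threshold then (st.1, st.2 ++ [coord])
          else (st.1 ++ [st.2], [coord]))
        ([], [c0])
      (st.1 ++ [st.2]).map (fun g => PySem.Int.floordiv g.sum (g.length : Int))

-- ===== PORT B =====
-- Source B's inner while loop: split (s[:k], s[k:]) at the first gap > threshold after `prev`.
def pvPeel (t : Option Int) (prev : Int) : List Int → List Int × List Int
  | [] => ([], [])
  | x :: xs =>
    if pvLeOpt (x - prev) t then
      let p := pvPeel t x xs
      (x :: p.1, p.2)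
    else ([], x :: xs)

theorem pvPeel_snd_length (t : Option Int) : ∀ (l : List Int) (prev : Int), (pvPeel t prev l).2.length ≤ l.length := by
  intro l
  induction l with
  | nil => intro prev; simp [pvPeel]
  | cons x xs ih =>
    intro prev
    simp only [pvPeel]
    split
    · exact Nat.le_succ_of_le (ih x)
    · simp

-- Source B's outer while loop: peel the leading group, emit its floor-average, continue on the rest.
def pvRun (t : Option Int) : List Int → List Int
  | [] => []
  | x :: xs =>
    let p := pvPeel t x xs
    PySem.Int.floordiv (x :: p.1).sum ((x :: p.1).length : Int) :: pvRun t p.2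
termination_by l => l.length
decreasing_by exact Nat.lt_succ_of_le (pvPeel_snd_length t xs x)

def group_coordinates_alt (coords : List Int) (threshold : Option Int) : List Int :=
  pvRun threshold (PySem.List.sorted coords (fun x => x))

-- ===== PRECONDITION & SPEC =====
-- Pre_ excludes threshold = None with two or more coordinates: there Python A (and B alike)
-- raises TypeError comparing an int with None.
def Pre_group_coordinates (coords : List Int) (threshold : Option Int) : Prop :=
  threshold ≠ none ∨ coords.length ≤ 1
instance (coords : List Int) (threshold : Option Int) : Decidable (Pre_group_coordinates coords threshold) := by unfold Pre_group_coordinates; infer_instance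

def pvWitness_group_coordinates : List Int × Option Int := ([1, 5, 2, 9], some 2)

def Spec_group_coordinates (coords : List Int) (threshold : Option Int) (out : List Int) : Prop := out = group_coordinates_alt coords threshold
instance (coords : List Int) (threshold : Option Int) (out : List Int) : Decidable (Spec_group_coordinates coords threshold out) := by unfold Spec_group_coordinates; infer_instance

-- ===== CLAIM (what is proved, stated in full; the proofs are below) =====
def Claim_equal_group_coordinates : Prop := ∀ (coords : List Int) (threshold : Option Int), Dom_group_coordinates coords threshold → Pre_group_coordinates coords threshold → Spec_group_coordinates coords threshold (group_coordinates coords threshold)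

-- ===== LEMMAS AND PROOFS =====

theorem pvGetLast!_concat (l : List Int) (x : Int) : (l ++ [x]).getLast! = x := by
  induction l with
  | nil => rfl
  | cons y ys ih => simpa [List.getLast!] using ih

-- Loop invariant: A's fold from state (done, cur) finishes to `done`'s averages followed by
-- B's peel-and-average of the current group joined with the remaining input.
theorem pvMain (t : Option Int) :
    ∀ (rest : List Int) (done : List (List Int)) (cur : List Int), cur ≠ [] →
      (let st := rest.foldl
        (fun (st : List (List Int) × List Int) coord =>
          if pvLeOpt (coord - st.2.getLast!) t then (st.1, st.2 ++ [coord])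
          else (st.1 ++ [st.2], [coord]))
        (done, cur)
       (st.1 ++ [st.2]).map (fun g => PySem.Int.floordiv g.sum (g.length : Int)))
      = done.map (fun g => PySem.Int.floordiv g.sum (g.length : Int)) ++
        (PySem.Int.floordiv (cur ++ (pvPeel t cur.getLast! rest).1).sum
            (((cur ++ (pvPeel t cur.getLast! rest).1).length : Int)) ::
          pvRun t (pvPeel t cur.getLast! rest).2) := by
  intro rest
  induction rest with
  | nil =>
    intro done cur hcur
    simp [pvPeel, pvRun]
  | cons coord rs ih =>
    intro done cur hcur
    simp only [List.foldl_cons]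
    by_cases hc : pvLeOpt (coord - cur.getLast!) t = true
    · rw [if_pos hc]
      have hcur' : cur ++ [coord] ≠ [] := by simp
      have := ih done (cur ++ [coord]) hcur'
      simp only at this
      rw [this, pvGetLast!_concat]
      simp only [pvPeel, hc, if_pos]
      simp [List.append_assoc]
    · rw [if_neg hc]
      have := ih (done ++ [cur]) [coord] (by simp)
      simp only at this
      rw [this]
      have h1 : ([coord] : List Int).getLast! = coord := rfl
      rw [h1]
      simp only [pvPeel, hc, Bool.false_eq_true, ite_false]
      conv_rhs => rw [pvRun]
      simp [List.map_append]

-- ===== VERDICT (by name: the statement is the Claim_ definition above) =====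
theorem group_coordinates_spec : Claim_equal_group_coordinates := by
  intro coords threshold _ _
  unfold Spec_group_coordinates group_coordinates group_coordinates_alt
  cases coords with
  | nil =>
    have hs : PySem.List.sorted ([] : List Int) (fun x => x) = [] := by decide
    simp [hs, pvRun]
  | cons a l =>
    cases h : PySem.List.sorted (a :: l) (fun x => x) with
    | nil => simp [pvRun]
    | cons c0 rest =>
      have h1 := pvMain threshold rest [] [c0] (by simp)
      simp only [List.map_nil, List.nil_append] at h1
      have h2 : PySem.Int.floordiv (([c0] : List Int) ++ (pvPeel threshold ([c0] : List Int).getLast! rest).1).sum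
            ((([c0] : List Int) ++ (pvPeel threshold ([c0] : List Int).getLast! rest).1).length : Int) ::
          pvRun threshold (pvPeel threshold ([c0] : List Int).getLast! rest).2
          = pvRun threshold (c0 :: rest) := by
        conv_rhs => rw [pvRun]
        simp [List.getLast!]
      exact h1.trans h2
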